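-- pv_equiv track=rewrite | github.com/tuligma/Piscine-Python-for-Data-Science-2025 | d01/ex01/read_and_write.py | change_fix
-- ===== SOURCE A (Python) =====
-- def start(item: str) -> bool:
--     return item.startswith('"') and not item.endswith('"')
--
-- def mid(item: str) -> bool:
--     return (
--         item not in ("false", "true")
--         and not item.startswith('"')
--         and not item.endswith('"')
--     )
--
-- def end(item: str) -> bool:
--     return not item.startswith('"') and item.endswith('"')
--
-- def checker(item: str) -> int:
--     if item in ("false", "true"):
--         return True
--     elif start(item) or mid(item) or end(item):
--         return False
--     else:
--         return True
--
-- def slice_get(lst: list) -> list: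
--     return [item for item in lst if not checker(item)]
--
-- def pop_insert(lst: list, to_pop: list, i: int) -> list:
--     for item in to_pop:
--         lst.remove(item)
--     lst.insert(i, ",".join(to_pop))
--     return lst
--
-- def change_fix(items: list) -> list:
--     final = []
--     for item in items:
--         line = item.split(",")
--         if len(line) > 6 and slice_get(line):
--             to_pop = slice_get(line)
--             i_tp = line.index(to_pop[0])
--             line = pop_insert(line, to_pop, i_tp)
--         line = "\t".join(line)
--         final.append(line)
--     return final
-- ===== SOURCE B (Python) =====
-- def _fails(item: str) -> bool:
--     if item in ("false", "true"):
--         return False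
--     return not (item.startswith('"') and item.endswith('"'))
--
-- def change_fix(items: list) -> list:
--     final = []
--     for item in items:
--         fields = item.split(",")
--         if len(fields) > 6:
--             failing = [f for f in fields if _fails(f)]
--             if failing:
--                 i = next(j for j, f in enumerate(fields) if _fails(f))
--                 fields = (fields[:i] + [",".join(failing)]
--                           + [f for f in fields[i + 1:] if not _fails(f)])
--         final.append("\t".join(fields))
--     return final
-- ===== Notes on version B (the rewrite author's own statement) =====
-- stated objective: simpler
-- what changed: B replaces A's helper cascade (start/mid/end/checker, the remove-each-failing-field loop and list.insert) with one inlined pass per line: take the prefix before the first failing field, place the comma-joined failing fields there, and keep only passing fields afterwards.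
import Mathlib
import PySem

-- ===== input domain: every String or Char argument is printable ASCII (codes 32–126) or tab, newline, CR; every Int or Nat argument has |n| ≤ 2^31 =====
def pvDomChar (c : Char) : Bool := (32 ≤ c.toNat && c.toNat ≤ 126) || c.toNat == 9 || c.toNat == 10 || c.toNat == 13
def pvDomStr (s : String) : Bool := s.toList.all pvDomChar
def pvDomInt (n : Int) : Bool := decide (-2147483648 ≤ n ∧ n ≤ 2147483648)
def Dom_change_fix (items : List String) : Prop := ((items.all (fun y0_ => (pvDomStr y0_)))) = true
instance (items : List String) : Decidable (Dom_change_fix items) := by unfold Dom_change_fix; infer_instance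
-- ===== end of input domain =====

-- B rebuilds each over-long line in one pass (prefix + comma-joined failing fields + passing rest)
-- instead of A's remove-loop + insert; objective: simpler. Return value only (A does not mutate its argument).

-- ===== PORT A =====
-- fields are handled as List Char (PySem.Chars is the exact model of Python's str operations)
def pvFalseL : List Char := ['f','a','l','s','e']
def pvTrueL : List Char := ['t','r','u','e']

def startA (item : List Char) : Bool :=
  PySem.Chars.startswith item ['"'] && !(PySem.Chars.endswith item ['"'])

def midA (item : List Char) : Bool :=
  !(item == pvFalseL || item == pvTrueL)
    && !(PySem.Chars.startswith item ['"'])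
    && !(PySem.Chars.endswith item ['"'])

def endA (item : List Char) : Bool :=
  !(PySem.Chars.startswith item ['"']) && PySem.Chars.endswith item ['"']

def checkerA (item : List Char) : Bool :=
  if item == pvFalseL || item == pvTrueL then true
  else if startA item || midA item || endA item then false
  else true

def slice_getA (lst : List (List Char)) : List (List Char) :=
  lst.filter (fun item => ! checkerA item)

-- Python list.remove raises ValueError when the value is absent; in change_fix every removed
-- value is an element of lst, so the `.getD acc` fallback for remove? = none is unreachable.
def pop_insertA (lst : List (List Char)) (to_pop : List (List Char)) (i : Int) : List (List Char) :=
  PySem.List.insert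
    (to_pop.foldl (fun acc item => (PySem.List.remove? acc item).getD acc) lst)
    i (PySem.Chars.join [','] to_pop)

def lineA (item : String) : String :=
  let line := PySem.Chars.splitOn item.toList [',']
  if 6 < line.length ∧ slice_getA line ≠ [] then
    match PySem.List.pyGet? (slice_getA line) 0 with
    | some v =>
      match PySem.List.index? line v with
      | some i_tp =>
          String.ofList (PySem.Chars.join ['\t'] (pop_insertA line (slice_getA line) (i_tp : Int)))
      | none => String.ofList (PySem.Chars.join ['\t'] line)  -- unreachable: v ∈ line
    | none => String.ofList (PySem.Chars.join ['\t'] line)    -- unreachable: the guard gives slice_getA line ≠ []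
  else String.ofList (PySem.Chars.join ['\t'] line)

def change_fix (items : List String) : List String :=
  items.foldl (fun final item => final ++ [lineA item]) []

-- ===== PORT B =====
def failsB (item : List Char) : Bool :=
  if item == pvFalseL || item == pvTrueL then false
  else !(PySem.Chars.startswith item ['"'] && PySem.Chars.endswith item ['"'])

def lineB (item : String) : String :=
  let fields := PySem.Chars.splitOn item.toList [',']
  let fields :=
    if 6 < fields.length then
      let failing := fields.filter failsB
      if failing = [] then fields
      else
        let i := fields.findIdx failsB
        fields.take i ++ [PySem.Chars.join [','] failing]
          ++ (fields.drop (i+1)).filter (fun f => !failsB f)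
    else fields
  String.ofList (PySem.Chars.join ['\t'] fields)

def change_fix_alt (items : List String) : List String := items.map lineB

-- ===== PRECONDITION & SPEC =====
def Spec_change_fix (items : List String) (out : List String) : Prop := out = change_fix_alt items
instance (items : List String) (out : List String) : Decidable (Spec_change_fix items out) := by unfold Spec_change_fix; infer_instance

-- ===== CLAIM (what is proved, stated in full; the proofs are below) =====
def Claim_equal_change_fix : Prop := ∀ (items : List String), Dom_change_fix items → Spec_change_fix items (change_fix items)

-- ===== LEMMAS AND PROOFS =====

theorem checkerA_eq_not_failsB (item : List Char) : checkerA item = ! failsB item := by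
  unfold checkerA failsB startA midA endA
  by_cases h : (item == pvFalseL || item == pvTrueL) = true
  · simp [h]
  · rw [Bool.not_eq_true] at h
    simp only [h]
    cases hs : PySem.Chars.startswith item ['"'] <;>
      cases he : PySem.Chars.endswith item ['"'] <;> simp

theorem slice_getA_eq_filter (lst : List (List Char)) :
    slice_getA lst = lst.filter failsB := by
  unfold slice_getA
  have : (fun item => ! checkerA item) = failsB := by
    funext c; rw [checkerA_eq_not_failsB, Bool.not_not]
  rw [this]

theorem exists_first_fail {p : List Char → Bool} {l : List (List Char)}
    (h : l.filter p ≠ []) :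
    ∃ t v r, l = t ++ v :: r ∧ (∀ x ∈ t, p x = false) ∧ p v = true := by
  induction l with
  | nil => simp at h
  | cons x xs ih =>
    by_cases hx : p x = true
    · exact ⟨[], x, xs, rfl, by simp, hx⟩
    · rw [Bool.not_eq_true] at hx
      have h' : xs.filter p ≠ [] := by
        intro hnil; apply h; simp [hx, hnil]
      obtain ⟨t, v, r, hl, ht, hv⟩ := ih h'
      exact ⟨x :: t, v, r, by rw [hl]; rfl, by
        intro y hy
        rcases List.mem_cons.mp hy with rfl | hy'
        · exact hx
        · exact ht y hy', hv⟩

theorem remove?_append_cons_self {α : Type} [BEq α] [LawfulBEq α]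
    (t r : List α) (v : α) (hv : v ∉ t) :
    PySem.List.remove? (t ++ v :: r) v = some (t ++ r) := by
  induction t with
  | nil => simp
  | cons x xs ih =>
    have hne : x ≠ v := by rintro rfl; exact hv (List.mem_cons_self)
    have hv' : v ∉ xs := fun hm => hv (List.mem_cons_of_mem _ hm)
    simp only [List.cons_append, PySem.List.remove?_cons_of_ne _ hne, ih hv', Option.map_some]

-- A's remove-loop over all failing values turns a passing prefix + rest into prefix + passing rest.
theorem removeFold (p : List Char → Bool) (r : List (List Char)) :
    ∀ t : List (List Char), (∀ x ∈ t, p x = false) →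
    (r.filter p).foldl (fun acc item => (PySem.List.remove? acc item).getD acc) (t ++ r)
      = t ++ r.filter (fun x => !p x) := by
  induction r with
  | nil => intro t _; simp
  | cons x xs ih =>
    intro t ht
    by_cases hx : p x = true
    · have hxt : x ∉ t := fun hm => by rw [ht x hm] at hx; cases hx
      rw [List.filter_cons_of_pos hx, List.foldl_cons,
        remove?_append_cons_self t xs x hxt]
      simp only [Option.getD_some]
      rw [ih t ht, List.filter_cons_of_neg (by simp [hx])]
    · rw [Bool.not_eq_true] at hx
      rw [List.filter_cons_of_neg (by simp [hx])]
      have := ih (t ++ [x]) (by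
        intro y hy
        rcases List.mem_append.mp hy with hy' | hy'
        · exact ht y hy'
        · simp at hy'; subst hy'; exact hx)
      rw [List.append_assoc, List.singleton_append] at this
      rw [this, List.filter_cons_of_pos (by simp [hx]), List.append_assoc,
        List.singleton_append]

theorem findIdx_first_fail (p : List Char → Bool) (t r : List (List Char)) (v : List Char)
    (ht : ∀ x ∈ t, p x = false) (hv : p v = true) :
    (t ++ v :: r).findIdx p = t.length := by
  induction t with
  | nil => simp [List.findIdx_cons, hv]
  | cons x xs ih =>
    have hx := ht x List.mem_cons_self
    simp only [List.cons_append, List.findIdx_cons, hx, cond_false, List.length_cons]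
    rw [ih (fun y hy => ht y (List.mem_cons_of_mem _ hy))]

theorem lineA_eq_lineB (item : String) : lineA item = lineB item := by
  unfold lineA lineB
  simp only [slice_getA_eq_filter]
  set l := PySem.Chars.splitOn item.toList [','] with hl_def
  by_cases hlen : 6 < l.length
  · by_cases hf : l.filter failsB = []
    · simp [hlen, hf]
    · obtain ⟨t, v, r, hl, ht, hv⟩ := exists_first_fail hf
      have hvt : v ∉ t := fun hm => by rw [ht v hm] at hv; cases hv
      have hfil : l.filter failsB = v :: r.filter failsB := by
        rw [hl, List.filter_append, List.filter_eq_nil_iff.mpr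
          (fun x hx => by simp [ht x hx]), List.nil_append,
          List.filter_cons_of_pos hv]
      rw [if_pos ⟨hlen, hf⟩, if_pos hlen, if_neg hf]
      have hget : PySem.List.pyGet? (l.filter failsB) 0 = some v := by
        rw [hfil]; simp [PySem.List.pyGet?, PySem.List.pyIdx?]
      have hidx : PySem.List.index? l v = some t.length := by
        rw [hl]
        exact (PySem.List.index?_eq_some_iff _ _ _).mpr ⟨t, r, rfl, rfl, hvt⟩
      simp only [hget, hidx]
      -- A side: the remove-fold then insert
      have hfold :
          (l.filter failsB).foldl (fun acc item => (PySem.List.remove? acc item).getD acc) l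
            = t ++ r.filter (fun x => !failsB x) := by
        rw [hfil, List.foldl_cons, hl, remove?_append_cons_self t r v hvt]
        simp only [Option.getD_some]
        exact removeFold failsB r t ht
      have hA : pop_insertA l (l.filter failsB) (t.length : Int)
          = t ++ PySem.Chars.join [','] (l.filter failsB) :: r.filter (fun x => !failsB x) := by
        unfold pop_insertA
        rw [hfold, PySem.List.insert_natCast _ _ _ (by simp), List.take_left, List.drop_left]
      -- B side: the one-pass rebuild
      have hi : l.findIdx failsB = t.length := by
        rw [hl]; exact findIdx_first_fail failsB t r v ht hv
      have htake : l.take t.length = t := by rw [hl]; exact List.take_left ..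
      have hdrop : l.drop (t.length + 1) = r := by
        rw [hl, show t ++ v :: r = (t ++ [v]) ++ r by simp]
        exact List.drop_left' (by simp)
      rw [hA, hi, htake, hdrop]
      simp
  · rw [if_neg (fun h => hlen h.1), if_neg hlen]

-- ===== VERDICT (by name: the statement is the Claim_ definition above) =====
theorem change_fix_spec : Claim_equal_change_fix := by
  intro items _
  unfold Spec_change_fix change_fix change_fix_alt
  rw [PySem.List.foldl_append_singleton_eq_map, List.nil_append]
  exact List.map_congr_left (fun x _ => lineA_eq_lineB x)
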